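-- pv_equiv track=rewrite | github.com/ali01/datastore | datastore/query.py | offset_gen
-- ===== SOURCE A (Python) =====
-- def offset_gen(offset, iterable):
--   '''A generator that applies an `offset`.'''
--   offset = int(offset)
--   assert offset >= 0, 'negative offset'
--
--   for item in iterable:
--     if offset > 0:
--       offset -= 1
--     else:
--       yield item
-- ===== SOURCE B (Python) =====
-- def offset_gen(offset, iterable):
--   '''A generator that applies an `offset`.'''
--   offset = int(offset)
--   assert offset >= 0, 'negative offset'
--
--   items = list(iterable)
--   yield from items[offset:]
-- ===== Notes on version B (the rewrite author's own statement) =====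
-- stated objective: simpler
-- what changed: Replaces A's streaming per-item countdown branch with materializing the iterable into a list and yielding a single slice items[offset:].
import Mathlib
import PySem

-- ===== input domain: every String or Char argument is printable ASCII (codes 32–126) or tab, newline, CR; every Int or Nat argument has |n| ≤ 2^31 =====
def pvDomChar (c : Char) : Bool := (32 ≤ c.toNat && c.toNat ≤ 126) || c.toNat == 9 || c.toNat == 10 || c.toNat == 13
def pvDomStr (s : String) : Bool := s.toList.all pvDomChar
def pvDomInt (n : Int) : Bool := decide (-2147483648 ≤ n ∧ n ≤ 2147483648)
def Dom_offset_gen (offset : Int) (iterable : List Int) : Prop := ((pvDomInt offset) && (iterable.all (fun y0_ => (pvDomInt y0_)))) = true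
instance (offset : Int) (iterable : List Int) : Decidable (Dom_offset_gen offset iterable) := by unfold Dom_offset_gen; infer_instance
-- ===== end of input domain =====

-- B replaces A's streaming per-item countdown with materializing the input and yielding one slice items[offset:] (return-value equivalence; B consumes the iterable eagerly, unlike A's lazy generator).


-- ===== PORT A =====
-- per-item loop: while offset > 0 decrement, otherwise yield the item
def offset_gen (offset : Int) (iterable : List Int) : List Int :=
  (iterable.foldl
    (fun (st : Int × List Int) item =>
      if st.1 > 0 then (st.1 - 1, st.2) else (st.1, st.2 ++ [item]))
    (offset, [])).2

-- ===== PORT B =====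
-- items = list(iterable); yield from items[offset:]
def offset_gen_alt (offset : Int) (iterable : List Int) : List Int :=
  let items := iterable
  PySem.List.slice items (some offset)

-- ===== PRECONDITION & SPEC =====
-- Pre_ excludes offset < 0, on which A's assert raises AssertionError (B asserts identically).
def Pre_offset_gen (offset : Int) (iterable : List Int) : Prop := 0 ≤ offset
instance (offset : Int) (iterable : List Int) : Decidable (Pre_offset_gen offset iterable) := by unfold Pre_offset_gen; infer_instance
def pvWitness_offset_gen : Int × List Int := (2, [1, 2, 3, 4])
def Spec_offset_gen (offset : Int) (iterable : List Int) (out : List Int) : Prop := out = offset_gen_alt offset iterable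
instance (offset : Int) (iterable : List Int) (out : List Int) : Decidable (Spec_offset_gen offset iterable out) := by unfold Spec_offset_gen; infer_instance

-- ===== CLAIM (what is proved, stated in full; the proofs are below) =====
def Claim_equal_offset_gen : Prop := ∀ (offset : Int) (iterable : List Int), Dom_offset_gen offset iterable → Pre_offset_gen offset iterable → Spec_offset_gen offset iterable (offset_gen offset iterable)

-- ===== LEMMAS AND PROOFS =====
-- A's loop with any nonnegative counter and accumulator computes acc ++ (drop the first `offset` items).
theorem offset_gen_loop (iterable : List Int) :
    ∀ (off : Int) (acc : List Int), 0 ≤ off →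
      (iterable.foldl
        (fun (st : Int × List Int) item =>
          if st.1 > 0 then (st.1 - 1, st.2) else (st.1, st.2 ++ [item]))
        (off, acc)).2 = acc ++ iterable.drop off.toNat := by
  induction iterable with
  | nil => intro off acc _; simp
  | cons x xs ih =>
    intro off acc hoff
    by_cases h : off > 0
    · have h1 : 0 ≤ off - 1 := by omega
      have ht : off.toNat = (off - 1).toNat + 1 := by omega
      simp only [List.foldl_cons, if_pos h, ih (off - 1) acc h1, ht, List.drop_succ_cons]
    · have h0 : off = 0 := by omega
      rw [List.foldl_cons, if_neg h, ih off (acc ++ [x]) hoff, h0]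
      simp

-- ===== VERDICT (by name: the statement is the Claim_ definition above) =====
theorem offset_gen_spec : Claim_equal_offset_gen := by
  intro offset iterable _ hpre
  unfold Spec_offset_gen offset_gen offset_gen_alt
  rw [PySem.List.slice_from iterable hpre]
  simpa using offset_gen_loop iterable offset [] hpre
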